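-- pv_equiv track=rewrite | github.com/8n8/trumat | rules.py | insert_space_after_start_list
-- ===== SOURCE A (Python) =====
-- def insert_space_after_start_list(old):
--     new = ""
--     for i, c in enumerate(old):
--         if c == "[":
--             try:
--                 if old[i + 1] != "]":
--                     new += "[ "
--                     continue
--
--             except IndexError:
--                 pass
--
--         new += c
--
--     return new, None
-- ===== SOURCE B (Python) =====
-- def insert_space_after_start_list(old):
--     # Scan right-to-left, carrying the previously seen character (= the
--     # lookahead in the original order); collect pieces and reverse at the end.
--     out = []
--     nxt = None
--     for c in reversed(old):
--         if c == "[" and nxt is not None and nxt != "]":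
--             out.append("[ ")
--         else:
--             out.append(c)
--         nxt = c
--     out.reverse()
--     return "".join(out), None
-- ===== Notes on version B (the rewrite author's own statement) =====
-- stated objective: alternative
-- what changed: Replaces A's forward indexed scan with try/except lookahead (old[i+1]) by a reverse scan that carries the previously seen character as the lookahead state, collecting pieces into a list that is reversed and joined at the end.
import Mathlib
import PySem

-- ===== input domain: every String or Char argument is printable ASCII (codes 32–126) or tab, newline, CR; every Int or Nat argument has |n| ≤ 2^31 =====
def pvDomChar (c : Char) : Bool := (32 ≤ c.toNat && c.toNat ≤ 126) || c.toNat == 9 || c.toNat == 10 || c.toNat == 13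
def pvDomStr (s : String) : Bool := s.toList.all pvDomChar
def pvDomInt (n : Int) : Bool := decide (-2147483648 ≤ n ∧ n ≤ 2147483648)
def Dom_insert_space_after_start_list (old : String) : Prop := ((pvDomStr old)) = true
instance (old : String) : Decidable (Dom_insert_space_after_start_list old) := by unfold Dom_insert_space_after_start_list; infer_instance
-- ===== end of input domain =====

-- B replaces A's indexed forward scan (with try/except lookahead) by a reverse
-- scan that carries the lookahead character as loop state (objective: alternative).

-- ===== PORT A =====
-- one loop step of A: p = (i, c); 'try old[i+1] … except IndexError: pass' is the none branch
def pvAStep (full : List Char) (new : List Char) (p : Int × Char) : List Char :=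
  if p.2 = '[' then
    match PySem.List.pyGet? full (p.1 + 1) with
    | some ch => if ch ≠ ']' then new ++ ['[', ' '] else new ++ [p.2]
    | none => new ++ [p.2]
  else new ++ [p.2]

def insert_space_after_start_list (old : String) : String × Option String :=
  (String.ofList ((PySem.List.enumerate old.toList 0).foldl (pvAStep old.toList) []), none)

-- ===== PORT B =====
-- one loop step of B: state = (out, nxt); reversed iteration supplies the chars
def pvBStep (st : List (List Char) × Option Char) (c : Char) : List (List Char) × Option Char :=
  (st.1 ++ [match st.2 with
            | some n => if c = '[' ∧ n ≠ ']' then ['[', ' '] else [c]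
            | none => [c]],
   some c)

def insert_space_after_start_list_alt (old : String) : String × Option String :=
  let st := old.toList.reverse.foldl pvBStep ([], none)
  (String.ofList st.1.reverse.flatten, none)

-- ===== PRECONDITION & SPEC =====
def Spec_insert_space_after_start_list (old : String) (out : String × Option String) : Prop := out = insert_space_after_start_list_alt old
instance (old : String) (out : String × Option String) : Decidable (Spec_insert_space_after_start_list old out) := by unfold Spec_insert_space_after_start_list; infer_instance

-- ===== CLAIM (what is proved, stated in full; the proofs are below) =====
def Claim_equal_insert_space_after_start_list : Prop := ∀ (old : String), Dom_insert_space_after_start_list old → Spec_insert_space_after_start_list old (insert_space_after_start_list old)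

-- ===== LEMMAS AND PROOFS =====

-- the piece emitted for a character c whose lookahead (next char, if any) is nxt
def pvPiece (c : Char) (nxt : Option Char) : List Char :=
  match nxt with
  | some n => if c = '[' ∧ n ≠ ']' then ['[', ' '] else [c]
  | none => [c]

-- pieces of cs, where nxt is the lookahead available after cs is exhausted
def pvPieces : List Char → Option Char → List (List Char)
  | [], _ => []
  | c :: rest, nxt => pvPiece c (rest.head?.or nxt) :: pvPieces rest nxt

lemma pvA_loop (full : List Char) : ∀ (cs : List Char) (k : Nat) (acc : List Char),
    full.drop k = cs →
    (PySem.List.enumerate cs (k : Int)).foldl (pvAStep full) acc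
      = acc ++ (pvPieces cs none).flatten := by
  intro cs
  induction cs with
  | nil => intro k acc h; simp [PySem.List.enumerate_nil, pvPieces]
  | cons c rest ih =>
    intro k acc h
    have hget : PySem.List.pyGet? full ((k : Int) + 1) = rest.head? := by
      have h1 : ((k : Int) + 1) = ((k + 1 : Nat) : Int) := by push_cast; ring
      rw [h1, PySem.List.pyGet?_natCast]
      have : full.drop (k + 1) = rest := by
        have := congrArg (List.drop 1) h
        simpa [List.drop_drop, Nat.add_comm] using this
      rw [← this]
      simp [List.getElem?_drop, List.head?_eq_getElem?]
    have hstep : pvAStep full acc ((k : Int), c) = acc ++ pvPiece c (rest.head?.or none) := by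
      simp only [pvAStep, pvPiece, Option.or_none]
      by_cases hc : c = '['
      · subst hc
        simp only [hget]
        cases rest with
        | nil => simp
        | cons r rs =>
          by_cases hr : r = ']'
          · subst hr; simp
          · simp [hr]
      · simp [hc]; cases rest.head? <;> rfl
    rw [PySem.List.enumerate_cons, List.foldl_cons, hstep]
    have h1 : ((k : Int) + 1) = ((k + 1 : Nat) : Int) := by push_cast; ring
    rw [h1, ih (k + 1) _ (by
      have := congrArg (List.drop 1) h
      simpa [List.drop_drop, Nat.add_comm] using this)]
    simp [pvPieces, List.append_assoc]

lemma pvB_loop : ∀ (cs : List Char) (nxt : Option Char) (out : List (List Char)),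
    cs.reverse.foldl pvBStep (out, nxt)
      = (out ++ (pvPieces cs nxt).reverse, cs.head?.or nxt) := by
  intro cs
  induction cs with
  | nil => intro nxt out; simp [pvPieces]
  | cons c rest ih =>
    intro nxt out
    rw [List.reverse_cons, List.foldl_append, ih nxt out]
    simp [pvBStep, pvPiece, pvPieces, List.append_assoc]

-- ===== VERDICT (by name: the statement is the Claim_ definition above) =====
theorem insert_space_after_start_list_spec : Claim_equal_insert_space_after_start_list := by
  intro old _
  unfold Spec_insert_space_after_start_list insert_space_after_start_list insert_space_after_start_list_alt
  rw [pvB_loop old.toList none []]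
  have hA := pvA_loop old.toList old.toList 0 [] (by simp)
  simp only [Nat.cast_zero] at hA
  rw [hA]
  simp
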